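-- pv_equiv track=rewrite | github.com/rocky-linux/oval | oval_xml.py | criteria
-- ===== SOURCE A (Python) =====
-- def criteria( scope, contents, xml = '' ) :
--     """
--     criteria defines logic expressions with zero or more
--     criterion and nested criteria
--     """
--
--     for index, content in enumerate( contents ) :
--
--         if content[ 'operator' ] != "" :
--             xml = xml + '  <criteria operator="' + content[ 'operator' ] + '">\n'
--
--         xml = xml + \
--               '    <criterion comment="' + content[ 'comment' ] + '"\n' + \
--               '      test_ref="' + scope + 'tst:' + content[ 'id' ] + '"/>\n'
--
--         if content[ 'nested' ] :
--             return criteria( scope, contents[index+1:], xml ) + '  </criteria>\n'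
--
--         if content[ 'operator' ] != "AND" :
--             xml = xml + '  </criteria>\n'
--
--     return xml
-- ===== SOURCE B (Python) =====
-- def criteria(scope, contents, xml=''):
--     """Single loop with a counter of deferred closing tags instead of recursion."""
--     pending = 0
--     for content in contents:
--         if content['operator'] != "":
--             xml = xml + '  <criteria operator="' + content['operator'] + '">\n'
--         xml = xml + \
--               '    <criterion comment="' + content['comment'] + '"\n' + \
--               '      test_ref="' + scope + 'tst:' + content['id'] + '"/>\n'
--         if content['nested']:
--             pending += 1
--             continue
--         if content['operator'] != "AND":
--             xml = xml + '  </criteria>\n'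
--     return xml + '  </criteria>\n' * pending
-- ===== Notes on version B (the rewrite author's own statement) =====
-- stated objective: simpler
-- what changed: Replaces A's tail recursion on the list suffix (one call frame per nested item, each appending its closing tag on return) with a single flat loop that counts deferred closing tags and appends them once at the end.
import Mathlib
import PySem

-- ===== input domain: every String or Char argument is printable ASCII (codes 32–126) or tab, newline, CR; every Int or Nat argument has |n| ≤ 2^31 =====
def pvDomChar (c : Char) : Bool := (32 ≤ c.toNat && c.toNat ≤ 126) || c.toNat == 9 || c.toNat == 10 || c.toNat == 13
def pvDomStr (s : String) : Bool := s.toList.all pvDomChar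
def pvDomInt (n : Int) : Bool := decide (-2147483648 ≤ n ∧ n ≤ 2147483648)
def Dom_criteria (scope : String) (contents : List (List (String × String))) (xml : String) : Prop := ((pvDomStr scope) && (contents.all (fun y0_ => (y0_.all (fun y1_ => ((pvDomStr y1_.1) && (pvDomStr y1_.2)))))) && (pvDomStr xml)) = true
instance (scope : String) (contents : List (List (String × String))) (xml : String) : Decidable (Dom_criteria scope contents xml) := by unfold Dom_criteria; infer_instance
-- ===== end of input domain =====

-- B replaces A's tail recursion on the list suffix by one flat loop counting deferred closing tags; objective: simpler.


-- dict indexing content[k] on the association list: value of the first pair with that key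
-- (total form; Pre_criteria guarantees the key is present, exactly where Python would not raise KeyError)
def pvGetKey (c : List (String × String)) (k : String) : String :=
  (((c.find? (fun p => p.1 == k)).map (fun p => p.2)).getD "")

-- ===== PORT A =====
-- literal transliteration of A: recursion on the remaining items; a nested item returns
-- 'criteria(scope, rest, xml) + close'; otherwise the for-loop continues on the tail.
def criteria (scope : String) (contents : List (List (String × String))) (xml : String) : String :=
  match contents with
  | [] => xml
  | content :: rest =>
    let xml1 := if pvGetKey content "operator" ≠ "" then
        xml ++ "  <criteria operator=\"" ++ pvGetKey content "operator" ++ "\">\n" else xml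
    let xml2 := xml1 ++ "    <criterion comment=\"" ++ pvGetKey content "comment" ++ "\"\n" ++
        "      test_ref=\"" ++ scope ++ "tst:" ++ pvGetKey content "id" ++ "\"/>\n"
    if pvGetKey content "nested" ≠ "" then
      criteria scope rest xml2 ++ "  </criteria>\n"
    else if pvGetKey content "operator" ≠ "AND" then
      criteria scope rest (xml2 ++ "  </criteria>\n")
    else
      criteria scope rest xml2

-- ===== PORT B =====
-- '  </criteria>\n' * pending
def pvRepClose : Nat → String
  | 0 => ""
  | n + 1 => "  </criteria>\n" ++ pvRepClose n

-- one iteration of B's loop on state (xml, pending)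
def pvStepB (scope : String) (st : String × Nat) (content : List (String × String)) : String × Nat :=
  let xml1 := if pvGetKey content "operator" ≠ "" then
      st.1 ++ "  <criteria operator=\"" ++ pvGetKey content "operator" ++ "\">\n" else st.1
  let xml2 := xml1 ++ "    <criterion comment=\"" ++ pvGetKey content "comment" ++ "\"\n" ++
      "      test_ref=\"" ++ scope ++ "tst:" ++ pvGetKey content "id" ++ "\"/>\n"
  if pvGetKey content "nested" ≠ "" then (xml2, st.2 + 1)
  else if pvGetKey content "operator" ≠ "AND" then (xml2 ++ "  </criteria>\n", st.2)
  else (xml2, st.2)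

def criteria_alt (scope : String) (contents : List (List (String × String))) (xml : String) : String :=
  let st := contents.foldl (pvStepB scope) (xml, 0)
  st.1 ++ pvRepClose st.2

-- ===== PRECONDITION & SPEC =====
-- Pre_ excludes exactly the inputs where some content dict lacks one of the four keys,
-- on which Python A raises KeyError.
def Pre_criteria (scope : String) (contents : List (List (String × String))) (xml : String) : Prop :=
  ∀ c ∈ contents, (c.find? (fun p => p.1 == "operator")).isSome ∧
    (c.find? (fun p => p.1 == "comment")).isSome ∧
    (c.find? (fun p => p.1 == "id")).isSome ∧
    (c.find? (fun p => p.1 == "nested")).isSome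
instance (scope : String) (contents : List (List (String × String))) (xml : String) : Decidable (Pre_criteria scope contents xml) := by unfold Pre_criteria; infer_instance

def pvWitness_criteria : String × (List (List (String × String))) × String :=
  ("oval:org.rocky.rlsa:", [[("operator", "OR"), ("comment", "c1"), ("id", "20211234001"), ("nested", "")]], "")

def Spec_criteria (scope : String) (contents : List (List (String × String))) (xml : String) (out : String) : Prop := out = criteria_alt scope contents xml
instance (scope : String) (contents : List (List (String × String))) (xml : String) (out : String) : Decidable (Spec_criteria scope contents xml out) := by unfold Spec_criteria; infer_instance

-- ===== CLAIM (what is proved, stated in full; the proofs are below) =====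
def Claim_equal_criteria : Prop := ∀ (scope : String) (contents : List (List (String × String))) (xml : String), Dom_criteria scope contents xml → Pre_criteria scope contents xml → Spec_criteria scope contents xml (criteria scope contents xml)

-- ===== LEMMAS AND PROOFS =====

-- the pending counter is additive in the start value; the xml component ignores it
theorem pvFoldl_shift (scope : String) (cs : List (List (String × String))) :
    ∀ (xml : String) (k : Nat),
      cs.foldl (pvStepB scope) (xml, k) =
        ((cs.foldl (pvStepB scope) (xml, 0)).1, k + (cs.foldl (pvStepB scope) (xml, 0)).2) := by
  induction cs with
  | nil => intro xml k; simp
  | cons c rest ih =>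
    intro xml k
    simp only [List.foldl_cons]
    have hstep : ∀ (x : String) (m : Nat),
        pvStepB scope (x, m) c = ((pvStepB scope (x, 0) c).1, m + (pvStepB scope (x, 0) c).2) := by
      intro x m
      simp only [pvStepB]
      split_ifs <;> simp
    rcases h : pvStepB scope (xml, 0) c with ⟨a, b⟩
    rw [hstep xml k, hstep xml 0, h]
    simp only [Nat.zero_add]
    rw [ih a (k + b), ih a b]
    simp [Nat.add_assoc]

-- appending one close after n closes is the same as prepending it
theorem pvRepClose_snoc (n : Nat) :
    pvRepClose n ++ "  </criteria>\n" = pvRepClose (n + 1) := by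
  induction n with
  | zero => rfl
  | succ m ih =>
    show ("  </criteria>\n" ++ pvRepClose m) ++ "  </criteria>\n" = "  </criteria>\n" ++ pvRepClose (m + 1)
    rw [String.append_assoc, ih]

theorem pvMain (scope : String) (cs : List (List (String × String))) :
    ∀ xml : String, criteria scope cs xml = criteria_alt scope cs xml := by
  induction cs with
  | nil => intro xml; simp [criteria, criteria_alt, pvRepClose, String.append_empty]
  | cons c rest ih =>
    intro xml
    simp only [criteria, criteria_alt, List.foldl_cons]
    simp only [pvStepB]
    split_ifs
    all_goals first
      | exact ih _
      | (rw [ih]; simp only [criteria_alt]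
         rw [pvFoldl_shift scope rest _ 1, String.append_assoc, pvRepClose_snoc]
         simp [Nat.add_comm])

-- ===== VERDICT (by name: the statement is the Claim_ definition above) =====
theorem criteria_spec : Claim_equal_criteria := by
  intro scope contents xml _ _
  unfold Spec_criteria
  exact pvMain scope contents xml
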